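-- pv_equiv track=rewrite | github.com/bvandenabbeele/AdventOfCode | python/day_08/main.py | part_1
-- ===== SOURCE A (Python) =====
-- def find_x(signal, digit_length, single=True):
--     digits = list()
--     for s in signal:
--         if len(s) == digit_length:
--             digits.append(s)
--
--         if single and len(digits) == 1:
--             return digits[0]
--
--     return digits
--
-- def find_one(signal):
--     return find_x(signal, 2)
--
-- def find_seven(signal):
--     return find_x(signal, 3)
--
-- def find_four(signal):
--     return find_x(signal, 4)
--
-- def find_eight(signals):
--     return find_x(signals, 7)
--
-- def part_1(signals, numbers):
--     cntr = 0
--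
--     for s_list, n_list in zip(signals, numbers):
--         unique_digits = [
--             find_one(s_list), find_four(s_list), find_seven(s_list), find_eight(s_list)
--         ]
--
--         for n in n_list:
--             if n in unique_digits:
--                 cntr += 1
--
--     return cntr
-- ===== SOURCE B (Python) =====
-- def part_1(signals, numbers):
--     cntr = 0
--     for s_list, n_list in zip(signals, numbers):
--         first = {}
--         for s in s_list:
--             first.setdefault(len(s), s)
--         for n in n_list:
--             if len(n) in (2, 3, 4, 7) and first.get(len(n)) == n:
--                 cntr += 1
--     return cntr
-- ===== Notes on version B (the rewrite author's own statement) =====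
-- stated objective: simpler
-- what changed: Replaces the four independent length-scans (find_one/four/seven/eight) per line with one pass building a length->first-signal dict, then a single length-keyed lookup per output digit.
import Mathlib
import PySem

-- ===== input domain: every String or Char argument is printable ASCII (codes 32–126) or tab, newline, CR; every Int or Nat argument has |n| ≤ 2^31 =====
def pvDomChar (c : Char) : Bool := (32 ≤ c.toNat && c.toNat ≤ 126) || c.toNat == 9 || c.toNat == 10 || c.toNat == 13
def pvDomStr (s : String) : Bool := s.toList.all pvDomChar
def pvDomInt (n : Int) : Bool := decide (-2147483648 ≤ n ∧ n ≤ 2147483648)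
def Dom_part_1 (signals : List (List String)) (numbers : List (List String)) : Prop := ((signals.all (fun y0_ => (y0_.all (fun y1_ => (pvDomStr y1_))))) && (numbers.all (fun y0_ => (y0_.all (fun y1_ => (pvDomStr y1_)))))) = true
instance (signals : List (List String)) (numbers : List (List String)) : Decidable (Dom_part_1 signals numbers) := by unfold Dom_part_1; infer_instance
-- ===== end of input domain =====

-- B replaces A's four per-line length-scans with one dict-building pass plus a length-keyed lookup (simpler, one traversal).

-- ===== PORT A =====
-- find_x(signal, digit_length) with single=True returns the FIRST signal of that length,
-- or the empty list [] when none exists; since a Python list never equals a string in the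
-- later membership test, the [] outcome is modelled exactly as `none`.
def findX (signal : List String) (digitLength : Int) : Option String :=
  match signal with
  | [] => none
  | s :: rest =>
      if PySem.Str.len s = digitLength then some s else findX rest digitLength

def part_1 (signals : List (List String)) (numbers : List (List String)) : Int :=
  (signals.zip numbers).foldl
    (fun cntr p =>
      let uniqueDigits := [findX p.1 2, findX p.1 4, findX p.1 3, findX p.1 7]
      p.2.foldl (fun c n => if some n ∈ uniqueDigits then c + 1 else c) cntr)
    0

-- ===== PORT B =====
def buildFirst (sList : List String) : PySem.Dict Int String :=
  sList.foldl (fun d s => d.setdefault (PySem.Str.len s) s) PySem.Dict.empty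

def part_1_alt (signals : List (List String)) (numbers : List (List String)) : Int :=
  (signals.zip numbers).foldl
    (fun cntr p =>
      let first := buildFirst p.1
      p.2.foldl
        (fun c n =>
          let l := PySem.Str.len n
          if ((l == 2 || l == 3 || l == 4 || l == 7) && (first.get? l == some n)) then c + 1 else c)
        cntr)
    0

-- ===== PRECONDITION & SPEC =====
def Spec_part_1 (signals : List (List String)) (numbers : List (List String)) (out : Int) : Prop := out = part_1_alt signals numbers
instance (signals : List (List String)) (numbers : List (List String)) (out : Int) : Decidable (Spec_part_1 signals numbers out) := by unfold Spec_part_1; infer_instance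

-- ===== CLAIM (what is proved, stated in full; the proofs are below) =====
def Claim_equal_part_1 : Prop := ∀ (signals : List (List String)) (numbers : List (List String)), Dom_part_1 signals numbers → Spec_part_1 signals numbers (part_1 signals numbers)

-- ===== LEMMAS AND PROOFS =====

theorem findX_len (signal : List String) (l : Int) (n : String)
    (h : findX signal l = some n) : PySem.Str.len n = l := by
  induction signal with
  | nil => simp [findX] at h
  | cons s rest ih =>
    simp only [findX] at h
    split at h
    · next hs => injection h with h'; subst h'; exact hs
    · exact ih h

theorem buildFirst_get_aux (sList : List String) (d : PySem.Dict Int String) (l : Int) :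
    (sList.foldl (fun d s => d.setdefault (PySem.Str.len s) s) d).get? l =
      (d.get? l).or (findX sList l) := by
  induction sList generalizing d with
  | nil => simp [findX]
  | cons s rest ih =>
    simp only [List.foldl_cons, ih]
    by_cases hs : PySem.Str.len s = l
    · subst hs
      rw [PySem.Dict.get?_setdefault_self]
      simp only [findX, if_true]
      cases d.get? (PySem.Str.len s) <;> rfl
    · rw [PySem.Dict.get?_setdefault_of_ne d s (fun h => hs h.symm)]
      simp only [findX, if_neg hs]

theorem buildFirst_get (sList : List String) (l : Int) :
    (buildFirst sList).get? l = findX sList l := by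
  rw [buildFirst, buildFirst_get_aux]
  rfl

theorem cond_iff (sList : List String) (n : String) :
    (some n ∈ [findX sList 2, findX sList 4, findX sList 3, findX sList 7]) ↔
    (((PySem.Str.len n == 2 || PySem.Str.len n == 3 || PySem.Str.len n == 4 || PySem.Str.len n == 7)
        && ((buildFirst sList).get? (PySem.Str.len n) == some n)) = true) := by
  simp only [List.mem_cons, List.not_mem_nil, or_false, buildFirst_get,
    Bool.and_eq_true, Bool.or_eq_true, beq_iff_eq]
  constructor
  · rintro (h | h | h | h) <;>
      (have hl := findX_len sList _ n h.symm
       refine ⟨?_, by rw [hl]; exact h.symm⟩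
       rw [hl]
       simp)
  · rintro ⟨hl, hg⟩
    rcases hl with ((hl | hl) | hl) | hl <;> rw [hl] at hg <;> simp [hg]

theorem inner_eq (sList ns : List String) (c : Int) :
    ns.foldl (fun c n =>
        if some n ∈ [findX sList 2, findX sList 4, findX sList 3, findX sList 7] then c + 1 else c) c =
    ns.foldl (fun c n =>
        let l := PySem.Str.len n
        if ((l == 2 || l == 3 || l == 4 || l == 7) && ((buildFirst sList).get? l == some n)) then c + 1 else c) c := by
  induction ns generalizing c with
  | nil => rfl
  | cons n rest ih =>
    simp only [List.foldl_cons]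
    rw [if_congr (cond_iff sList n) rfl rfl]
    exact ih _

theorem outer_eq (ps : List (List String × List String)) (c : Int) :
    ps.foldl
      (fun cntr p =>
        let uniqueDigits := [findX p.1 2, findX p.1 4, findX p.1 3, findX p.1 7]
        p.2.foldl (fun c n => if some n ∈ uniqueDigits then c + 1 else c) cntr) c =
    ps.foldl
      (fun cntr p =>
        let first := buildFirst p.1
        p.2.foldl
          (fun c n =>
            let l := PySem.Str.len n
            if ((l == 2 || l == 3 || l == 4 || l == 7) && (first.get? l == some n)) then c + 1 else c) cntr) c := by
  induction ps generalizing c with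
  | nil => rfl
  | cons p rest ih =>
    simp only [List.foldl_cons]
    rw [inner_eq p.1 p.2 c]
    exact ih _

-- ===== VERDICT (by name: the statement is the Claim_ definition above) =====
theorem part_1_spec : Claim_equal_part_1 := by
  intro signals numbers _
  unfold Spec_part_1 part_1 part_1_alt
  exact outer_eq (signals.zip numbers) 0
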